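-- pv_equiv track=rewrite | github.com/aliekins/SATProject | nonogram.py | calculate_block_positions
-- ===== SOURCE A (Python) =====
-- def calculate_block_positions(rules, n, start_indx):
--     positions = []
--     current_start = start_indx
--
--     for rule in rules:
--         for block in range(len(rule)):
--             min_pos = current_start
--             max_pos = current_start + n
--
--             block_pos = list(range(min_pos, max_pos))
--             positions.append(block_pos)
--
--             current_start = max_pos
--     return positions
-- ===== SOURCE B (Python) =====
-- def calculate_block_positions(rules, n, start_indx):
--     total = sum(len(rule) for rule in rules)
--     return [list(range(start_indx + i * n, start_indx + i * n + n))
--             for i in range(total)]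
-- ===== Notes on version B (the rewrite author's own statement) =====
-- stated objective: simpler
-- what changed: Replaces the nested loops threading a mutable current_start accumulator with a single comprehension over a flat block index, computing each block's start by arithmetic offset start_indx + i*n.
import Mathlib
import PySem

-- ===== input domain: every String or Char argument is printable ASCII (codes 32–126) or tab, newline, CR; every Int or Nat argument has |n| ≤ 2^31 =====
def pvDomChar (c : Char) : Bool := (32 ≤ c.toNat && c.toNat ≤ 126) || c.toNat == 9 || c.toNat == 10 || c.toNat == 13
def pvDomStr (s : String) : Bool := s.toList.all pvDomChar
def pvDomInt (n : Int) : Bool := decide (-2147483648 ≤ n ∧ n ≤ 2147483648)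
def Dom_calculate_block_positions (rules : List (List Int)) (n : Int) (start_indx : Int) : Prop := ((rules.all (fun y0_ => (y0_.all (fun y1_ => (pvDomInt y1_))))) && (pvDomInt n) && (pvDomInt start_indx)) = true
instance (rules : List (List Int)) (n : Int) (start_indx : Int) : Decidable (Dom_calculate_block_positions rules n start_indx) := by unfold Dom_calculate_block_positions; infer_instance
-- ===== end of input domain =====

-- B replaces A's nested loops with a running current_start by one comprehension over a flat block index i, computing each start as start_indx + i*n (objective: simpler).


-- ===== PORT A =====
def calculate_block_positions (rules : List (List Int)) (n : Int) (start_indx : Int) : List (List Int) :=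
  (rules.foldl (fun (st : List (List Int) × Int) rule =>
    (PySem.List.pyRange 0 (rule.length : Int) 1).foldl (fun (st : List (List Int) × Int) _block =>
      let min_pos := st.2
      let max_pos := st.2 + n
      let block_pos := PySem.List.pyRange min_pos max_pos 1
      (st.1 ++ [block_pos], max_pos)) st) ([], start_indx)).1

-- ===== PORT B =====
def calculate_block_positions_alt (rules : List (List Int)) (n : Int) (start_indx : Int) : List (List Int) :=
  let total : Int := (rules.map (fun rule => (rule.length : Int))).sum
  (PySem.List.pyRange 0 total 1).map (fun i =>
    PySem.List.pyRange (start_indx + i * n) (start_indx + i * n + n) 1)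

-- ===== PRECONDITION & SPEC =====
def Spec_calculate_block_positions (rules : List (List Int)) (n : Int) (start_indx : Int) (out : List (List Int)) : Prop := out = calculate_block_positions_alt rules n start_indx
instance (rules : List (List Int)) (n : Int) (start_indx : Int) (out : List (List Int)) : Decidable (Spec_calculate_block_positions rules n start_indx out) := by unfold Spec_calculate_block_positions; infer_instance

-- ===== CLAIM (what is proved, stated in full; the proofs are below) =====
def Claim_equal_calculate_block_positions : Prop := ∀ (rules : List (List Int)) (n : Int) (start_indx : Int), Dom_calculate_block_positions rules n start_indx → Spec_calculate_block_positions rules n start_indx (calculate_block_positions rules n start_indx)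

-- ===== LEMMAS AND PROOFS =====

-- ===== VERDICT (by name: the statement is the Claim_ definition above) =====

-- step function of A's loop body (one block)
theorem cbp_inner (n : Int) (k : Nat) (acc : List (List Int)) (c : Int) :
    (PySem.List.pyRange 0 (k : Int) 1).foldl (fun (st : List (List Int) × Int) _block =>
      (st.1 ++ [PySem.List.pyRange st.2 (st.2 + n) 1], st.2 + n)) (acc, c)
    = (acc ++ (List.range k).map (fun (j : Nat) => PySem.List.pyRange (c + (j : Int) * n) (c + (j : Int) * n + n) 1),
       c + (k : Int) * n) := by
  induction k generalizing acc c with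
  | zero => simp [PySem.List.pyRange_one_eq_nil]
  | succ m ih =>
      rw [show ((m + 1 : Nat) : Int) = (m : Int) + 1 by push_cast; ring,
          PySem.List.pyRange_one_succ_right (by positivity)]
      rw [List.foldl_append]
      simp only [List.foldl_cons, List.foldl_nil]
      rw [ih, Prod.mk.injEq]
      refine ⟨?_, by ring⟩
      rw [List.range_succ, List.map_append, List.append_assoc]
      simp

-- A's outer loop: the whole fold in closed form (flat block index j)
theorem cbp_outer (n : Int) (rules : List (List Int)) (acc : List (List Int)) (c : Int) :
    rules.foldl (fun (st : List (List Int) × Int) rule =>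
      (PySem.List.pyRange 0 (rule.length : Int) 1).foldl (fun (st : List (List Int) × Int) _block =>
        (st.1 ++ [PySem.List.pyRange st.2 (st.2 + n) 1], st.2 + n)) st) (acc, c)
    = (acc ++ (List.range (rules.map List.length).sum).map
          (fun (j : Nat) => PySem.List.pyRange (c + (j : Int) * n) (c + (j : Int) * n + n) 1),
       c + ((rules.map List.length).sum : Int) * n) := by
  induction rules generalizing acc c with
  | nil => simp
  | cons r rs ih =>
      simp only [List.foldl_cons]
      rw [cbp_inner, ih, Prod.mk.injEq, List.map_cons, List.sum_cons]
      refine ⟨?_, by push_cast; ring⟩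
      rw [List.range_add, List.map_append, List.append_assoc, List.map_map]
      congr 2
      refine List.map_congr_left fun j _ => ?_
      simp only [Function.comp_apply]
      push_cast
      ring_nf

theorem calculate_block_positions_spec : Claim_equal_calculate_block_positions := by
  intro rules n start_indx _
  unfold Spec_calculate_block_positions
  show calculate_block_positions rules n start_indx = _
  unfold calculate_block_positions calculate_block_positions_alt
  rw [cbp_outer]
  have htot : ((rules.map (fun rule => (rule.length : Int))).sum)
      = (((rules.map List.length).sum : Nat) : Int) := by
    simp [Function.comp_def]
  simp only [List.nil_append, htot, PySem.List.pyRange_zero_natCast, List.map_map]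
  rfl
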